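-- pv_equiv track=rewrite | github.com/Magi-01/Repository | Artificial_Intelligence/calculations.py | next_position
-- ===== SOURCE A (Python) =====
-- def is_valid_position(pos, grid_size, obstacles):
--     x, y = pos
--     width, height = grid_size
--     if not (0 <= x < width and 0 <= y < height):
--         return False
--     if pos in obstacles:
--         return False
--     return True
--
-- def next_position(pos, direction, speed, grid_size, obstacles):
--     x, y = pos
--     dx, dy = direction
--     nx, ny = x, y
--     for _ in range(speed):
--         tx, ty = nx + dx, ny + dy
--         if is_valid_position((tx, ty), grid_size, obstacles):
--             nx, ny = tx, ty
--         else: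
--             break
--     return (nx, ny)
-- ===== SOURCE B (Python) =====
-- def next_position(pos, direction, speed, grid_size, obstacles):
--     x, y = pos
--     dx, dy = direction
--     width, height = grid_size
--
--     def axis_bound(c, d, size):
--         # max k >= 0 such that steps 1..k keep c + i*d inside [0, size)
--         if d == 0:
--             return speed if 0 <= c < size else 0
--         if d > 0:
--             return 0 if c + d < 0 else (size - 1 - c) // d
--         return 0 if c + d >= size else c // (-d)
--
--     kb = min(speed, axis_bound(x, dx, width), axis_bound(y, dy, height))
--     if kb < 0:
--         kb = 0
--     obs = set(obstacles)
--     for i in range(1, kb + 1):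
--         if (x + i * dx, y + i * dy) in obs:
--             return (x + (i - 1) * dx, y + (i - 1) * dy)
--     return (x + kb * dx, y + kb * dy)
-- ===== Notes on version B (the rewrite author's own statement) =====
-- stated objective: alternative
-- what changed: B replaces A's per-step validity test (boundary comparison plus a linear scan of the obstacle list at every step) by an O(1) closed-form floor-division cutoff for the grid boundary per axis, followed by a scan that only tests obstacle membership in a prebuilt set.
import Mathlib
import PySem

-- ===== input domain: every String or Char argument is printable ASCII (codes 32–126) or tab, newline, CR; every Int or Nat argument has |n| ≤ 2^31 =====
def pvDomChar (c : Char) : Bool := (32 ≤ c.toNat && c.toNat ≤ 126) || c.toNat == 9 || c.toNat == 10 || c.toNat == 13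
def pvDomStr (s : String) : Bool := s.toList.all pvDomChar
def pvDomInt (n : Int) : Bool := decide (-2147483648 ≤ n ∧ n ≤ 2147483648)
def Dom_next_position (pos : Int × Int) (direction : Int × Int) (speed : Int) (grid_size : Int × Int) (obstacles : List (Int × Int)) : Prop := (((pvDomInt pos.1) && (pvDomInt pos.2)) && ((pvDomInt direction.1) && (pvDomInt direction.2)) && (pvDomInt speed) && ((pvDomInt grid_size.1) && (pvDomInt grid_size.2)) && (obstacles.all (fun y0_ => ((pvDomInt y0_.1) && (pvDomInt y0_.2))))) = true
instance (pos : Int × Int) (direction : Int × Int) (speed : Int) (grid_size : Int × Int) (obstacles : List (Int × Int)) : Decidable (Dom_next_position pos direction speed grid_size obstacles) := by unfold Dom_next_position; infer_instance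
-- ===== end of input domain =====

-- B replaces A's per-step validity test (bounds check + list scan) by an O(1) closed-form
-- boundary cutoff plus an obstacle-only scan over a prebuilt set (alternative decomposition).

-- ===== PORT A =====
def is_valid_position (pos : Int × Int) (grid_size : Int × Int) (obstacles : List (Int × Int)) : Bool :=
  if ¬(0 ≤ pos.1 ∧ pos.1 < grid_size.1 ∧ 0 ≤ pos.2 ∧ pos.2 < grid_size.2) then false
  else if pos ∈ obstacles then false
  else true

def npLoopA (direction : Int × Int) (grid_size : Int × Int) (obstacles : List (Int × Int)) : Nat → Int × Int → Int × Int
  | 0, p => p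
  | Nat.succ n, p =>
    let t := (p.1 + direction.1, p.2 + direction.2)
    if is_valid_position t grid_size obstacles then npLoopA direction grid_size obstacles n t
    else p

def next_position (pos : Int × Int) (direction : Int × Int) (speed : Int) (grid_size : Int × Int) (obstacles : List (Int × Int)) : Int × Int :=
  npLoopA direction grid_size obstacles speed.toNat pos

-- ===== PORT B =====
-- axis_bound from Source B: max k ≥ 0 s.t. steps 1..k keep c + i*d inside [0, size)
def npAxisBound (c d size sp : Int) : Int :=
  if d = 0 then (if 0 ≤ c ∧ c < size then sp else 0)
  else if 0 < d then (if c + d < 0 then 0 else PySem.Int.floordiv (size - 1 - c) d)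
  else (if size ≤ c + d then 0 else PySem.Int.floordiv c (-d))

-- the obstacle-only scan 'for i in range(1, kb+1)'
def npLoopB (x y dx dy : Int) (obs : PySem.Set (Int × Int)) : Int → Nat → Int × Int
  | i, 0 => (x + (i - 1) * dx, y + (i - 1) * dy)
  | i, Nat.succ n =>
    if PySem.Set.contains obs (x + i * dx, y + i * dy) then (x + (i - 1) * dx, y + (i - 1) * dy)
    else npLoopB x y dx dy obs (i + 1) n

def next_position_alt (pos : Int × Int) (direction : Int × Int) (speed : Int) (grid_size : Int × Int) (obstacles : List (Int × Int)) : Int × Int :=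
  let x := pos.1; let y := pos.2
  let dx := direction.1; let dy := direction.2
  let kb0 := min speed (min (npAxisBound x dx grid_size.1 speed) (npAxisBound y dy grid_size.2 speed))
  let kb := if kb0 < 0 then 0 else kb0
  npLoopB x y dx dy (PySem.Set.ofList obstacles) 1 kb.toNat

-- ===== PRECONDITION & SPEC =====
def Spec_next_position (pos : Int × Int) (direction : Int × Int) (speed : Int) (grid_size : Int × Int) (obstacles : List (Int × Int)) (out : Int × Int) : Prop := out = next_position_alt pos direction speed grid_size obstacles
instance (pos : Int × Int) (direction : Int × Int) (speed : Int) (grid_size : Int × Int) (obstacles : List (Int × Int)) (out : Int × Int) : Decidable (Spec_next_position pos direction speed grid_size obstacles out) := by unfold Spec_next_position; infer_instance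

-- ===== CLAIM (what is proved, stated in full; the proofs are below) =====
def Claim_equal_next_position : Prop := ∀ (pos : Int × Int) (direction : Int × Int) (speed : Int) (grid_size : Int × Int) (obstacles : List (Int × Int)), Dom_next_position pos direction speed grid_size obstacles → Spec_next_position pos direction speed grid_size obstacles (next_position pos direction speed grid_size obstacles)

-- ===== LEMMAS AND PROOFS =====

-- steps 1..axisBound are in range on this axis
theorem npAxisBound_ok (c d size sp i : Int) (h1 : 1 ≤ i) (h2 : i ≤ npAxisBound c d size sp) :
    0 ≤ c + i * d ∧ c + i * d < size := by
  unfold npAxisBound at h2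
  split_ifs at h2 with hd hin hdp hneg hout
  · simp only [hd, mul_zero]; omega
  · omega
  · omega
  · rw [PySem.Int.le_floordiv_iff_mul_le hdp] at h2
    constructor
    · nlinarith [mul_nonneg (show (0:Int) ≤ i - 1 by omega) (show (0:Int) ≤ d by omega)]
    · nlinarith
  · omega
  · rw [PySem.Int.le_floordiv_iff_mul_le (by omega : (0:Int) < -d)] at h2
    constructor
    · nlinarith
    · nlinarith [mul_nonpos_of_nonneg_of_nonpos (show (0:Int) ≤ i - 1 by omega) (show d ≤ 0 by omega)]

-- if the axis bound is binding (< sp), the step right after (max 0 bound) leaves the range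
theorem npAxisBound_fail (c d size sp : Int) (h : npAxisBound c d size sp < sp) :
    ¬(0 ≤ c + (max 0 (npAxisBound c d size sp) + 1) * d ∧
      c + (max 0 (npAxisBound c d size sp) + 1) * d < size) := by
  unfold npAxisBound at *
  split_ifs at * with hd hin hdp hneg hout
  · omega
  · simp only [hd, mul_zero]; omega
  · simp only [max_self]; intro hc; omega
  · by_cases hq : 0 ≤ PySem.Int.floordiv (size - 1 - c) d
    · rw [max_eq_right hq]
      have := (PySem.Int.floordiv_lt_iff_lt_mul (a := size - 1 - c) hdp
        (q := PySem.Int.floordiv (size - 1 - c) d + 1)).mp (by omega)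
      intro hc; nlinarith
    · push Not at hq
      rw [max_eq_left (by omega)]
      have := (PySem.Int.floordiv_lt_iff_lt_mul (a := size - 1 - c) hdp (q := 0)).mp hq
      intro hc; nlinarith
  · simp only [max_self]; intro hc; omega
  · by_cases hq : 0 ≤ PySem.Int.floordiv c (-d)
    · rw [max_eq_right hq]
      have := (PySem.Int.floordiv_lt_iff_lt_mul (a := c) (by omega : (0:Int) < -d)
        (q := PySem.Int.floordiv c (-d) + 1)).mp (by omega)
      intro hc; nlinarith
    · push Not at hq
      rw [max_eq_left (by omega)]
      have := (PySem.Int.floordiv_lt_iff_lt_mul (a := c) (by omega : (0:Int) < -d) (q := 0)).mp hq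
      intro hc; nlinarith

-- core loop equivalence: starting at step j, A's remaining speed-loop equals B's obstacle scan,
-- given that steps 1..K are in range and (if the cutoff is binding) step K+1 is not
theorem npLoop_eq (x y dx dy w h : Int) (obstacles : List (Int × Int)) (S K : Nat)
    (hKS : K ≤ S)
    (H1 : ∀ m : Nat, 1 ≤ m → m ≤ K →
      0 ≤ x + (m : Int) * dx ∧ x + (m : Int) * dx < w ∧ 0 ≤ y + (m : Int) * dy ∧ y + (m : Int) * dy < h)
    (H2 : K < S → ¬(0 ≤ x + ((K : Int) + 1) * dx ∧ x + ((K : Int) + 1) * dx < w ∧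
      0 ≤ y + ((K : Int) + 1) * dy ∧ y + ((K : Int) + 1) * dy < h)) :
    ∀ (n j : Nat), j + n = K →
      npLoopA (dx, dy) (w, h) obstacles (S - j) (x + (j : Int) * dx, y + (j : Int) * dy) =
      npLoopB x y dx dy (PySem.Set.ofList obstacles) ((j : Int) + 1) n := by
  intro n
  induction n with
  | zero =>
    intro j hj
    have hjK : j = K := by omega
    subst hjK
    simp only [npLoopB]
    rcases Nat.eq_or_lt_of_le hKS with hSK | hSK
    · rw [← hSK, Nat.sub_self]
      simp only [npLoopA, Prod.mk.injEq]
      exact ⟨by ring, by ring⟩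
    · have hs : S - j = (S - j - 1) + 1 := by omega
      rw [hs]
      have hfail := H2 hSK
      have e1 : x + ((j:Int) + 1) * dx = x + (j:Int) * dx + dx := by ring
      have e2 : y + ((j:Int) + 1) * dy = y + (j:Int) * dy + dy := by ring
      rw [e1, e2] at hfail
      have hvalid : is_valid_position (x + (j:Int)*dx + dx, y + (j:Int)*dy + dy) (w, h) obstacles = false := by
        unfold is_valid_position
        dsimp only
        rw [if_pos hfail]
      simp only [npLoopA, hvalid, Bool.false_eq_true, if_false, Prod.mk.injEq]
      exact ⟨by ring, by ring⟩
  | succ n ih =>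
    intro j hj
    have hjK : j < K := by omega
    have hs : S - j = (S - (j + 1)) + 1 := by omega
    rw [hs]
    simp only [npLoopA, npLoopB]
    have e1 : x + ((j:Int) + 1) * dx = x + (j:Int) * dx + dx := by ring
    have e2 : y + ((j:Int) + 1) * dy = y + (j:Int) * dy + dy := by ring
    have hR := H1 (j + 1) (by omega) (by omega)
    push_cast at hR
    rw [e1, e2] at hR
    have hcon : PySem.Set.contains (PySem.Set.ofList obstacles) (x + ((j:Int)+1) * dx, y + ((j:Int)+1) * dy)
        = decide ((x + (j:Int)*dx + dx, y + (j:Int)*dy + dy) ∈ obstacles) := by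
      rw [e1, e2]; simp [PySem.Set.mem_ofList]
    rw [hcon]
    by_cases hob : (x + (j:Int)*dx + dx, y + (j:Int)*dy + dy) ∈ obstacles
    · have hv : is_valid_position (x + (j:Int)*dx + dx, y + (j:Int)*dy + dy) (w, h) obstacles = false := by
        unfold is_valid_position
        dsimp only
        rw [if_neg (not_not_intro ⟨hR.1, hR.2.1, hR.2.2.1, hR.2.2.2⟩), if_pos hob]
      simp only [hv, Bool.false_eq_true, if_false, hob, decide_true, if_true, Prod.mk.injEq]
      exact ⟨by ring, by ring⟩
    · have hv : is_valid_position (x + (j:Int)*dx + dx, y + (j:Int)*dy + dy) (w, h) obstacles = true := by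
        unfold is_valid_position
        dsimp only
        rw [if_neg (not_not_intro ⟨hR.1, hR.2.1, hR.2.2.1, hR.2.2.2⟩), if_neg hob]
      have hIH := ih (j + 1) (by omega)
      push_cast at hIH
      rw [e1, e2] at hIH
      simp only [hv, if_true, hob, decide_false, Bool.false_eq_true, if_false]
      exact hIH

-- assembling: B's cutoff kb satisfies the hypotheses of npLoop_eq
theorem np_main (x y dx dy speed w h : Int) (obstacles : List (Int × Int)) :
    npLoopA (dx, dy) (w, h) obstacles speed.toNat (x, y) =
    npLoopB x y dx dy (PySem.Set.ofList obstacles) 1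
      (if min speed (min (npAxisBound x dx w speed) (npAxisBound y dy h speed)) < 0 then 0
       else min speed (min (npAxisBound x dx w speed) (npAxisBound y dy h speed))).toNat := by
  set bx := npAxisBound x dx w speed with hbx
  set by' := npAxisBound y dy h speed with hby
  set kb : Int := (if min speed (min bx by') < 0 then 0 else min speed (min bx by')) with hkb
  have hkbnn : 0 ≤ kb := by rw [hkb]; split <;> omega
  set S := speed.toNat with hS
  set K := kb.toNat with hK
  have hKS : K ≤ S := by omega
  have H1 : ∀ m : Nat, 1 ≤ m → m ≤ K →
      0 ≤ x + (m : Int) * dx ∧ x + (m : Int) * dx < w ∧ 0 ≤ y + (m : Int) * dy ∧ y + (m : Int) * dy < h := by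
    intro m hm1 hmK
    have hmx : (m : Int) ≤ bx := by omega
    have hmy : (m : Int) ≤ by' := by omega
    obtain ⟨hx1, hx2⟩ := npAxisBound_ok x dx w speed m (by exact_mod_cast hm1) hmx
    obtain ⟨hy1, hy2⟩ := npAxisBound_ok y dy h speed m (by exact_mod_cast hm1) hmy
    exact ⟨hx1, hx2, hy1, hy2⟩
  have H2 : K < S → ¬(0 ≤ x + ((K : Int) + 1) * dx ∧ x + ((K : Int) + 1) * dx < w ∧
      0 ≤ y + ((K : Int) + 1) * dy ∧ y + ((K : Int) + 1) * dy < h) := by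
    intro hKSlt
    have hkbsp : kb < speed := by omega
    rcases le_total bx by' with hxy | hxy
    · have hxsp : bx < speed := by omega
      have hKval : (K : Int) = max 0 bx := by omega
      rw [hKval]
      have hfx := npAxisBound_fail x dx w speed hxsp
      rw [← hbx] at hfx
      intro hc
      exact hfx ⟨hc.1, hc.2.1⟩
    · have hysp : by' < speed := by omega
      have hKval : (K : Int) = max 0 by' := by omega
      rw [hKval]
      have hfy := npAxisBound_fail y dy h speed hysp
      rw [← hby] at hfy
      intro hc
      exact hfy ⟨hc.2.2.1, hc.2.2.2⟩
  have main := npLoop_eq x y dx dy w h obstacles S K hKS H1 H2 K 0 (by omega)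
  simpa using main

-- ===== VERDICT (by name: the statement is the Claim_ definition above) =====
theorem next_position_spec : Claim_equal_next_position := by
  intro pos direction speed grid_size obstacles _
  unfold Spec_next_position next_position next_position_alt
  obtain ⟨x, y⟩ := pos
  obtain ⟨dx, dy⟩ := direction
  obtain ⟨w, h⟩ := grid_size
  exact np_main x y dx dy speed w h obstacles
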